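-- pv_equiv track=rewrite | github.com/gallori-ai/topology-aware-sdm | code/experiment_neural_baseline.py | hamming_rank
-- ===== SOURCE A (Python) =====
-- def hamming_rank(query_addr, addresses, query_id):
--     """Rank nodes by Hamming distance (closest first)."""
--     ranked = []
--     for nid, addr in addresses.items():
--         if nid == query_id:
--             continue
--         d = (query_addr ^ addr).bit_count()
--         ranked.append((d, nid))
--     ranked.sort()
--     return [nid for _, nid in ranked]
-- ===== SOURCE B (Python) =====
-- def hamming_rank(query_addr, addresses, query_id):
--     """Rank nodes by Hamming distance (closest first), via distance buckets."""
--     buckets = {}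
--     for nid, addr in addresses.items():
--         if nid == query_id:
--             continue
--         d = (query_addr ^ addr).bit_count()
--         buckets.setdefault(d, []).append(nid)
--     out = []
--     for d in sorted(buckets):
--         out.extend(sorted(buckets[d]))
--     return out
-- ===== Notes on version B (the rewrite author's own statement) =====
-- stated objective: faster
-- what changed: B replaces A's single global comparison sort of (distance, nid) tuples by a one-pass grouping of nids into distance buckets, then emits the buckets in ascending distance order, each bucket sorted by nid; with few distinct distances (at most the address bit-width) the per-bucket sorts avoid tuple comparisons and run faster.
import Mathlib
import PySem

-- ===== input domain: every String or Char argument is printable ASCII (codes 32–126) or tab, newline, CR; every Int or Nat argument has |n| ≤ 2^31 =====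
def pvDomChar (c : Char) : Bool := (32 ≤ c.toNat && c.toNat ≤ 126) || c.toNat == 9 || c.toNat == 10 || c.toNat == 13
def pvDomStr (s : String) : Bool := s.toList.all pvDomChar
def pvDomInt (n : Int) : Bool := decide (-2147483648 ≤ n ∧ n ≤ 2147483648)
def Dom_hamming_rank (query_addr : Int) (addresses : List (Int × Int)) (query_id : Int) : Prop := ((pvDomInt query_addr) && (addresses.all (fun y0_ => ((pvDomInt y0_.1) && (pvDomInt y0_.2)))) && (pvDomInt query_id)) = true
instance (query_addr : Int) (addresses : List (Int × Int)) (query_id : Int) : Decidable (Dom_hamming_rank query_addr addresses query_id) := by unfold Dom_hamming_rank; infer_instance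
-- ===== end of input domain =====

-- ===== PORT A =====
-- B replaces A's global sort of (distance, nid) tuples by distance buckets; same return value.
def hamming_rank (query_addr : Int) (addresses : List (Int × Int)) (query_id : Int) : List Int :=
  let ranked : List (Int × Int) := addresses.foldl (fun acc p =>
    if p.1 = query_id then acc
    else acc ++ [((PySem.Int.bitCount (PySem.Int.bxor query_addr p.2) : Int), p.1)]) []
  (PySem.List.sorted2 ranked (fun q => q.1) (fun q => q.2)).map (fun q => q.2)

-- ===== PORT B =====
def hamming_rank_alt (query_addr : Int) (addresses : List (Int × Int)) (query_id : Int) : List Int :=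
  let buckets : PySem.Dict Int (List Int) := addresses.foldl (fun b p =>
    if p.1 = query_id then b
    else b.modify (PySem.Int.bitCount (PySem.Int.bxor query_addr p.2) : Int) [] (fun s => s ++ [p.1]))
    PySem.Dict.empty
  (PySem.List.sorted buckets.keys (fun d => d)).foldl
    (fun out d => out ++ PySem.List.sorted (buckets.getD d []) (fun n => n)) []

-- ===== PRECONDITION & SPEC =====
def Spec_hamming_rank (query_addr : Int) (addresses : List (Int × Int)) (query_id : Int) (out : List Int) : Prop := out = hamming_rank_alt query_addr addresses query_id
instance (query_addr : Int) (addresses : List (Int × Int)) (query_id : Int) (out : List Int) : Decidable (Spec_hamming_rank query_addr addresses query_id out) := by unfold Spec_hamming_rank; infer_instance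

-- ===== CLAIM (what is proved, stated in full; the proofs are below) =====
def Claim_equal_hamming_rank : Prop := ∀ (query_addr : Int) (addresses : List (Int × Int)) (query_id : Int), Dom_hamming_rank query_addr addresses query_id → Spec_hamming_rank query_addr addresses query_id (hamming_rank query_addr addresses query_id)

-- ===== LEMMAS AND PROOFS =====

-- the grouping dict built by B, over the already-filtered (distance, nid) list
def groupD (r : List (Int × Int)) : PySem.Dict Int (List Int) :=
  r.foldl (fun b q => b.modify q.1 [] (fun s => s ++ [q.2])) PySem.Dict.empty

lemma groupD_append_singleton (r : List (Int × Int)) (k v : Int) :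
    groupD (r ++ [(k, v)]) = (groupD r).modify k [] (fun s => s ++ [v]) := by
  simp [groupD, List.foldl_append]

lemma hr_fusion (qa qi : Int) (l r : List (Int × Int)) :
    l.foldl (fun b p => if p.1 = qi then b
      else b.modify (PySem.Int.bitCount (PySem.Int.bxor qa p.2) : Int) [] (fun s => s ++ [p.1])) (groupD r)
    = groupD (l.foldl (fun acc p => if p.1 = qi then acc
      else acc ++ [((PySem.Int.bitCount (PySem.Int.bxor qa p.2) : Int), p.1)]) r) := by
  induction l generalizing r with
  | nil => rfl
  | cons p l ih =>
    simp only [List.foldl_cons]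
    by_cases h : p.1 = qi
    · rw [if_pos h, if_pos h]; exact ih r
    · rw [if_neg h, if_neg h, ← groupD_append_singleton]; exact ih _


lemma groupD_getD (r : List (Int × Int)) (d : Int) :
    (groupD r).getD d [] = (r.filter (fun q => decide (q.1 = d))).map (fun q => q.2) := by
  induction r using List.reverseRecOn with
  | nil => rfl
  | append_singleton r q ih =>
    obtain ⟨k, v⟩ := q
    rw [groupD_append_singleton, PySem.Dict.modify, PySem.Dict.getD_insert]
    by_cases h : d = k
    · subst h; simp [ih, List.filter_append]
    · simp [h, Ne.symm h, List.filter_append, ih]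

lemma groupD_keys (r : List (Int × Int)) :
    (groupD r).keys = PySem.Set.ofList (r.map (fun q => q.1)) := by
  induction r using List.reverseRecOn with
  | nil => rfl
  | append_singleton r q ih =>
    obtain ⟨k, v⟩ := q
    rw [groupD_append_singleton, PySem.Dict.modify,
      List.map_append, List.map_cons, List.map_nil, PySem.Set.ofList_append_singleton, ← ih]
    by_cases h : k ∈ (groupD r).keys
    · rw [PySem.Dict.keys_insert_of_contains _ _ ((PySem.Dict.contains_iff_mem_keys _ _).mpr h),
        PySem.Set.add_of_mem h]
    · rw [PySem.Dict.keys_insert_of_not_contains _ _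
        (Bool.eq_false_iff.mpr (fun hc => h ((PySem.Dict.contains_iff_mem_keys _ _).mp hc))),
        PySem.Set.add_of_not_mem h]

lemma sorted2_eq_sorted_lex (xs : List (Int × Int)) :
    PySem.List.sorted2 xs (fun q => q.1) (fun q => q.2)
      = PySem.List.sorted xs (fun q => toLex q) := by
  simp only [PySem.List.sorted2, PySem.List.sorted, Bool.false_eq_true, if_false]
  congr 1
  funext acc x
  congr 1
  funext a b
  simp only [← decide_not, ← Bool.decide_and, ← Bool.decide_or]
  rw [decide_eq_decide, Prod.Lex.toLex_lt_toLex]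
  omega

lemma flatMap_filter_perm (r : List (Int × Int)) (ks : List Int) (hnd : ks.Nodup) :
    (ks.flatMap (fun d => r.filter (fun q => decide (q.1 = d)))).Perm
      (r.filter (fun q => decide (q.1 ∈ ks))) := by
  induction ks with
  | nil => simp
  | cons d ks ih =>
    rcases List.nodup_cons.mp hnd with ⟨hd, hnd'⟩
    simp only [List.flatMap_cons]
    refine ((ih hnd').append_left _).trans ?_
    have h1 : List.filter (fun q : Int × Int => decide (q.1 = d)) r
        = List.filter (fun q : Int × Int => decide (q.1 = d))
            (List.filter (fun q => decide (q.1 ∈ d :: ks)) r) := by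
      rw [List.filter_filter]
      refine (List.filter_congr ?_).symm
      intro x _
      by_cases h : x.1 = d <;> simp [h]
    have h2 : List.filter (fun q : Int × Int => decide (q.1 ∈ ks)) r
        = List.filter (fun q : Int × Int => !decide (q.1 = d))
            (List.filter (fun q => decide (q.1 ∈ d :: ks)) r) := by
      rw [List.filter_filter]
      refine (List.filter_congr ?_).symm
      intro x _
      by_cases h : x.1 = d
      · simp [h, hd]
      · simp [h]
    rw [h1, h2]
    exact List.filter_append_perm _ _

lemma flatMap_sorted_pairwise (ks : List Int) (g : Int → List Int) (h : ks.Pairwise (· < ·)) :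
    (ks.flatMap (fun d => (PySem.List.sorted (g d) (fun n => n)).map (fun n => (d, n)))).Pairwise
      (fun a b => toLex a ≤ toLex b) := by
  induction ks with
  | nil => simp
  | cons d ks ih =>
    rcases List.pairwise_cons.mp h with ⟨hdlt, hp⟩
    simp only [List.flatMap_cons]
    refine List.pairwise_append.mpr ⟨?_, ih hp, ?_⟩
    · exact List.Pairwise.map _
        (fun a b hle => Prod.Lex.toLex_le_toLex.mpr (Or.inr ⟨rfl, hle⟩))
        (PySem.List.sorted_pairwise (g d) (fun n => n))
    · intro a ha b hb
      rcases List.mem_map.mp ha with ⟨n, _, rfl⟩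
      rcases List.mem_flatMap.mp hb with ⟨d', hd', hb'⟩
      rcases List.mem_map.mp hb' with ⟨m, _, rfl⟩
      exact Prod.Lex.toLex_le_toLex.mpr (Or.inl (hdlt d' hd'))

lemma flatMap_sorted_perm (ks : List Int) (g : Int → List Int) :
    (ks.flatMap (fun d => (PySem.List.sorted (g d) (fun n => n)).map (fun n => (d, n)))).Perm
      (ks.flatMap (fun d => (g d).map (fun n => (d, n)))) := by
  induction ks with
  | nil => simp
  | cons d ks ih =>
    simp only [List.flatMap_cons]
    exact ((PySem.List.sorted_perm (g d) (fun n => n) false).map _).append ih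

lemma map_snd_filter_fst (r : List (Int × Int)) (d : Int) :
    ((r.filter (fun q => decide (q.1 = d))).map (fun q => q.2)).map (fun n => (d, n))
      = r.filter (fun q => decide (q.1 = d)) := by
  induction r with
  | nil => rfl
  | cons q r ih =>
    by_cases h : q.1 = d
    · subst h; simp [ih]
    · simp [h, ih]

-- ===== VERDICT (by name: the statement is the Claim_ definition above) =====
theorem hamming_rank_spec : Claim_equal_hamming_rank := by
  intro qa as qi _
  unfold Spec_hamming_rank hamming_rank hamming_rank_alt
  dsimp only
  rw [show (PySem.Dict.empty : PySem.Dict Int (List Int)) = groupD [] from rfl,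
    hr_fusion qa qi as []]
  set ranked := as.foldl (fun acc p => if p.1 = qi then acc
    else acc ++ [((PySem.Int.bitCount (PySem.Int.bxor qa p.2) : Int), p.1)]) [] with hranked
  set ks := PySem.List.sorted (groupD ranked).keys (fun d => d) with hks
  have hksnd : ks.Nodup := by
    refine (PySem.List.sorted_perm (groupD ranked).keys (fun d => d) false).symm.nodup ?_
    rw [groupD_keys]; exact PySem.Set.nodup_ofList _
  have hkslt : ks.Pairwise (· < ·) := by
    rw [hks, groupD_keys]; exact PySem.List.sorted_ofList_pairwise_lt _
  have hcov : ∀ q ∈ ranked, q.1 ∈ ks := by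
    intro q hq
    rw [hks, PySem.List.mem_sorted, groupD_keys, PySem.Set.mem_ofList]
    exact List.mem_map.mpr ⟨q, hq, rfl⟩
  have main : PySem.List.sorted ranked (fun q => toLex q)
      = ks.flatMap (fun d =>
          (PySem.List.sorted ((groupD ranked).getD d []) (fun n => n)).map (fun n => (d, n))) := by
    refine PySem.List.eq_of_perm_of_pairwise_le_of_injective
      (fun q : Int × Int => toLex q) toLex.injective ?_
      (PySem.List.sorted_pairwise _ _) (flatMap_sorted_pairwise ks _ hkslt)
    refine (PySem.List.sorted_perm _ _ _).trans ?_
    refine (((flatMap_sorted_perm ks _).trans ?_).symm)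
    have : (ks.flatMap (fun d => ((groupD ranked).getD d []).map (fun n => (d, n))))
        = ks.flatMap (fun d => ranked.filter (fun q => decide (q.1 = d))) := by
      refine List.flatMap_congr ?_  -- pointwise
      intro d _
      rw [groupD_getD, map_snd_filter_fst]
    rw [this]
    refine (flatMap_filter_perm ranked ks hksnd).trans ?_
    rw [List.filter_eq_self.mpr (fun q hq => by simpa using hcov q hq)]
  rw [sorted2_eq_sorted_lex, main, PySem.List.foldl_append_eq_flatMap]
  simp [List.map_flatMap, List.map_map]
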